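-- pv_equiv track=rewrite | github.com/ChristiaaaaanCurrin/AlgebraicGame | tic_tac_toe.py | generate_row_masks
-- ===== SOURCE A (Python) =====
-- def generate_row_masks(to_win, rows, columns):
--     win_masks = []
--     row_mask = (1 << to_win) - 1
--     for r in range(rows):
--         win_masks.append(row_mask)
--         for c in range(columns - to_win):
--             row_mask = row_mask << 1
--             win_masks.append(row_mask)
--         row_mask = row_mask << to_win
--     return win_masks
-- ===== SOURCE B (Python) =====
-- def generate_row_masks(to_win, rows, columns):
--     base = (1 << to_win) - 1
--     w = max(columns - to_win, 0)
--     stride = to_win + w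
--     return [base << (r * stride + c) for r in range(rows) for c in range(w + 1)]
-- ===== Notes on version B (the rewrite author's own statement) =====
-- stated objective: simpler
-- what changed: Replaces the stateful running row_mask (shifted incrementally inside nested loops) with a single comprehension that emits each mask directly by index arithmetic: base << (r*stride + c).
import Mathlib
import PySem

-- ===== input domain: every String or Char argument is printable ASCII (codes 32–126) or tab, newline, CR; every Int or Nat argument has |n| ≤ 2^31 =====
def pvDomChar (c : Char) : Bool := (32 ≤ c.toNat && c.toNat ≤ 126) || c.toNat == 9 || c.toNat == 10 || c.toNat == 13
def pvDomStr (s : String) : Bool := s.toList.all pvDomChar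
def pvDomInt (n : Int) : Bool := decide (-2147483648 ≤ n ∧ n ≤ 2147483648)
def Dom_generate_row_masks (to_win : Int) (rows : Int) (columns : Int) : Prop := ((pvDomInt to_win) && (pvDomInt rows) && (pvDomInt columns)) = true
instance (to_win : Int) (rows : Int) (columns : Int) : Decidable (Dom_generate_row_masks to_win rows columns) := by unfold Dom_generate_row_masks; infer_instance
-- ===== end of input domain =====

-- B replaces A's stateful incrementally-shifted row_mask with direct index arithmetic
-- (base << (r*stride + c)); objective: simpler. Equivalence proved for to_win ≥ 0 (Pre_).

-- ===== PORT A =====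
-- '1 << to_win' is ported as 2 ^ to_win.toNat, exact for to_win ≥ 0 (Pre_ excludes
-- to_win < 0, where Python raises ValueError: negative shift count).
def generate_row_masks (to_win : Int) (rows : Int) (columns : Int) : List Int :=
  let st := (PySem.List.pyRange 0 rows 1).foldl
    (fun (st : List Int × Int) _r =>
      let st1 := (st.1 ++ [st.2], st.2)
      let st2 := (PySem.List.pyRange 0 (columns - to_win) 1).foldl
        (fun (s : List Int × Int) _c => (s.1 ++ [s.2 * 2], s.2 * 2)) st1
      (st2.1, st2.2 * 2 ^ to_win.toNat))
    (([] : List Int), 2 ^ to_win.toNat - 1)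
  st.1

-- ===== PORT B =====
def generate_row_masks_alt (to_win : Int) (rows : Int) (columns : Int) : List Int :=
  let base : Int := 2 ^ to_win.toNat - 1
  let w := max (columns - to_win) 0
  let stride := to_win + w
  (PySem.List.pyRange 0 rows 1).flatMap (fun r =>
    (PySem.List.pyRange 0 (w + 1) 1).map (fun c => base * 2 ^ (r * stride + c).toNat))

-- ===== PRECONDITION & SPEC =====
-- Pre_ excludes exactly to_win < 0, where Python A raises ValueError ('1 << to_win').
def Pre_generate_row_masks (to_win : Int) (rows : Int) (columns : Int) : Prop := 0 ≤ to_win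
instance (to_win : Int) (rows : Int) (columns : Int) : Decidable (Pre_generate_row_masks to_win rows columns) := by unfold Pre_generate_row_masks; infer_instance
def pvWitness_generate_row_masks : Int × Int × Int := (3, 3, 4)

def Spec_generate_row_masks (to_win : Int) (rows : Int) (columns : Int) (out : List Int) : Prop := out = generate_row_masks_alt to_win rows columns
instance (to_win : Int) (rows : Int) (columns : Int) (out : List Int) : Decidable (Spec_generate_row_masks to_win rows columns out) := by unfold Spec_generate_row_masks; infer_instance

-- ===== CLAIM (what is proved, stated in full; the proofs are below) =====
def Claim_equal_generate_row_masks : Prop := ∀ (to_win : Int) (rows : Int) (columns : Int), Dom_generate_row_masks to_win rows columns → Pre_generate_row_masks to_win rows columns → Spec_generate_row_masks to_win rows columns (generate_row_masks to_win rows columns)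

-- ===== LEMMAS AND PROOFS =====

-- Both programs produce (2^t - 1) * 2^(r*(m+t)+c) for r < rows, c ≤ m, in row-major order,
-- where t = to_win.toNat and m = (columns - to_win).toNat.
def pvRowSpec (t m rows : Nat) : List Int :=
  (List.range rows).flatMap (fun r =>
    (List.range (m + 1)).map (fun c => ((2 : Int) ^ t - 1) * 2 ^ (r * (m + t) + c)))

theorem pvMapRangeSucc {α : Type} (n : Nat) (g : Nat → α) :
    (List.range (n + 1)).map g = g 0 :: (List.range n).map (fun i => g (i + 1)) := by
  rw [List.range_succ_eq_map, List.map_cons, List.map_map]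
  simp [Function.comp_def]

theorem pvFlatMapRangeSucc {α : Type} (n : Nat) (f : Nat → List α) :
    (List.range (n + 1)).flatMap f = f 0 ++ (List.range n).flatMap (fun r => f (r + 1)) := by
  rw [List.range_succ_eq_map, List.flatMap_cons, List.flatMap_map]

theorem pvInnerFold (l : List Int) (acc : List Int) (v : Int) :
    l.foldl (fun (s : List Int × Int) _c => (s.1 ++ [s.2 * 2], s.2 * 2)) (acc, v)
      = (acc ++ (List.range l.length).map (fun i => v * 2 ^ (i + 1)), v * 2 ^ l.length) := by
  induction l generalizing acc v with
  | nil => simp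
  | cons x xs ih =>
    simp only [List.foldl_cons, ih, List.length_cons]
    rw [Prod.mk.injEq]
    constructor
    · rw [pvMapRangeSucc xs.length (fun i => v * 2 ^ (i + 1))]
      have : (fun i => v * 2 * (2:Int) ^ (i + 1)) = (fun i => v * 2 ^ (i + 1 + 1)) := by
        funext i; rw [pow_succ]; ring
      simp [this, List.append_assoc]
    · rw [pow_succ]; ring

theorem pvOuterFold (tw cols : Int) (t : Nat) (l : List Int) (acc : List Int) (v : Int) :
    l.foldl (fun (st : List Int × Int) _r =>
        let st1 := (st.1 ++ [st.2], st.2)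
        let st2 := (PySem.List.pyRange 0 (cols - tw) 1).foldl
          (fun (s : List Int × Int) _c => (s.1 ++ [s.2 * 2], s.2 * 2)) st1
        (st2.1, st2.2 * 2 ^ t)) (acc, v)
      = (acc ++ (List.range l.length).flatMap (fun r =>
            (List.range ((cols - tw).toNat + 1)).map
              (fun c => v * 2 ^ (r * ((cols - tw).toNat + t) + c))),
         v * 2 ^ (l.length * ((cols - tw).toNat + t))) := by
  induction l generalizing acc v with
  | nil => simp
  | cons x xs ih =>
    set m := (cols - tw).toNat with hm
    have hlen : (PySem.List.pyRange 0 (cols - tw) 1).length = m := by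
      simp [PySem.List.length_pyRange_one, hm]
    simp only [List.foldl_cons]
    rw [show (PySem.List.pyRange 0 (cols - tw) 1).foldl
          (fun (s : List Int × Int) _c => (s.1 ++ [s.2 * 2], s.2 * 2)) (acc ++ [v], v)
        = (acc ++ [v] ++ (List.range m).map (fun i => v * 2 ^ (i + 1)), v * 2 ^ m) by
      rw [pvInnerFold, hlen]]
    rw [ih]
    rw [Prod.mk.injEq]
    constructor
    · rw [List.length_cons,
        pvFlatMapRangeSucc xs.length
          (fun r => (List.range (m + 1)).map (fun c => v * 2 ^ (r * (m + t) + c)))]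
      have h0 : (List.range (m + 1)).map (fun c => v * (2:Int) ^ (0 * (m + t) + c))
          = v :: (List.range m).map (fun i => v * 2 ^ (i + 1)) := by
        rw [pvMapRangeSucc m (fun c => v * (2:Int) ^ (0 * (m + t) + c))]
        simp
      have h1 : ∀ r : Nat, ((List.range (m + 1)).map
            (fun c => v * 2 ^ m * 2 ^ t * (2:Int) ^ (r * (m + t) + c)))
          = (List.range (m + 1)).map (fun c => v * (2:Int) ^ ((r + 1) * (m + t) + c)) := by
        intro r
        apply List.map_congr_left
        intro c _
        rw [show (r + 1) * (m + t) + c = (r * (m + t) + c) + m + t by ring, pow_add, pow_add]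
        ring
      simp only [h0, h1]
      simp [List.append_assoc]
    · rw [List.length_cons, Nat.succ_mul, pow_add, pow_add]; ring

theorem pvACharacterization (to_win rows columns : Int) :
    generate_row_masks to_win rows columns
      = pvRowSpec to_win.toNat (columns - to_win).toNat rows.toNat := by
  unfold generate_row_masks pvRowSpec
  rw [pvOuterFold to_win columns to_win.toNat]
  rw [PySem.List.pyRange_one]
  simp

theorem pvBCharacterization (to_win rows columns : Int) (h : 0 ≤ to_win) :
    generate_row_masks_alt to_win rows columns
      = pvRowSpec to_win.toNat (columns - to_win).toNat rows.toNat := by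
  unfold generate_row_masks_alt pvRowSpec
  dsimp only
  set t := to_win.toNat with ht
  set m := (columns - to_win).toNat with hm
  have hw : max (columns - to_win) 0 = (m : Int) := by omega
  have hstride : to_win + max (columns - to_win) 0 = ((m + t : Nat) : Int) := by
    rw [hw]; push_cast; omega
  rw [hstride, hw]
  rw [PySem.List.pyRange_one 0 rows, PySem.List.pyRange_one 0 ((m : Int) + 1)]
  rw [List.flatMap_map]
  have hidx : (((m : Int) + 1) - 0).toNat = m + 1 := by omega
  rw [hidx]
  simp only [sub_zero]
  apply List.flatMap_congr
  intro r _
  rw [List.map_map]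
  apply List.map_congr_left
  intro c _
  have : ((0 + (r : Int)) * ((m + t : Nat) : Int) + (0 + (c : Int))).toNat
      = r * (m + t) + c := by
    rw [show ((0 + (r : Int)) * ((m + t : Nat) : Int) + (0 + (c : Int)))
        = ((r * (m + t) + c : Nat) : Int) by push_cast; ring]
    exact Int.toNat_natCast _
  simp only [Function.comp_def, this]

-- ===== VERDICT (by name: the statement is the Claim_ definition above) =====
theorem generate_row_masks_spec : Claim_equal_generate_row_masks := by
  intro to_win rows columns _hdom hpre
  unfold Spec_generate_row_masks
  rw [pvACharacterization, pvBCharacterization to_win rows columns hpre]
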